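-- pv_equiv track=rewrite | github.com/Legacy107/advent-of-code | 2024/day-9/part2.py | find_leftmost_free_span
-- ===== SOURCE A (Python) =====
-- def find_leftmost_free_span(blocks, file_length):
--     free_length = 0
--     start_index = -1
--     for i, block in enumerate(blocks):
--         if block is None:
--             if free_length == 0:
--                 start_index = i
--             free_length += 1
--             if free_length == file_length:
--                 return start_index
--         else:
--             free_length = 0
--             start_index = -1
--     return -1
-- ===== SOURCE B (Python) =====
-- def find_leftmost_free_span(blocks, file_length):
--     if file_length <= 0:
--         return -1
--     # Positions of occupied cells, bracketed by sentinels: the free spans are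
--     # exactly the gaps between consecutive barriers.
--     barriers = [-1] + [i for i, b in enumerate(blocks) if b is not None] + [len(blocks)]
--     for a, c in zip(barriers, barriers[1:]):
--         if c - a - 1 >= file_length:
--             return a + 1
--     return -1
-- ===== Notes on version B (the rewrite author's own statement) =====
-- stated objective: alternative
-- what changed: B first builds the list of indices of occupied (non-None) cells bracketed by sentinels -1 and len(blocks), then scans consecutive barrier pairs and returns a+1 for the first gap of size >= file_length; A instead runs an element-by-element counter/start-index state machine over the blocks.
import Mathlib
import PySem

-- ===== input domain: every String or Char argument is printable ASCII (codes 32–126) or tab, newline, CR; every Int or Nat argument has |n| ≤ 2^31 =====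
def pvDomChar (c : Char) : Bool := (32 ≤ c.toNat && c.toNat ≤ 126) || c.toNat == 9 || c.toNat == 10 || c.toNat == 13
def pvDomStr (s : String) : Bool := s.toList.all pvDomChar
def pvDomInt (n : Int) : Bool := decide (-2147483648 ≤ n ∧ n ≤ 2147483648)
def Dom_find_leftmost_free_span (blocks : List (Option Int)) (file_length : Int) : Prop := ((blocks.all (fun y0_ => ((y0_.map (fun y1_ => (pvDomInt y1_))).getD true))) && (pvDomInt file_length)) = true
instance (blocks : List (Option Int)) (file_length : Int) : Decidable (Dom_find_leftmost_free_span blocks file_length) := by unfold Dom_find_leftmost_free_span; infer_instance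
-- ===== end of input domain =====

-- B is an alternative, equally fast implementation: it lists the indices of occupied
-- cells (with sentinels) and scans the gaps between consecutive barriers.

-- ===== PORT A =====
-- A's for-loop over enumerate(blocks) with state (free_length, start_index) and early return.
def pvALoop (xs : List (Option Int)) (i : Int) (fl : Int) (free : Int) (start : Int) : Int :=
  match xs with
  | [] => -1
  | b :: rest =>
    match b with
    | none =>
      let start' := if free = 0 then i else start
      let free' := free + 1
      if free' = fl then start' else pvALoop rest (i + 1) fl free' start'
    | some _ => pvALoop rest (i + 1) fl 0 (-1)

def find_leftmost_free_span (blocks : List (Option Int)) (file_length : Int) : Int :=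
  pvALoop blocks 0 file_length 0 (-1)

-- ===== PORT B =====
-- B's list comprehension: indices (offset i) of the non-None elements.
def pvIdxSome (xs : List (Option Int)) (i : Int) : List Int :=
  match xs with
  | [] => []
  | none :: rest => pvIdxSome rest (i + 1)
  | some _ :: rest => i :: pvIdxSome rest (i + 1)

-- B's for-loop over zip(barriers, barriers[1:]): scan consecutive pairs.
def pvGapScan (fl : Int) (bs : List Int) : Int :=
  match bs with
  | a :: c :: rest => if fl ≤ c - a - 1 then a + 1 else pvGapScan fl (c :: rest)
  | _ => -1

def find_leftmost_free_span_alt (blocks : List (Option Int)) (file_length : Int) : Int :=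
  if file_length ≤ 0 then -1
  else pvGapScan file_length ((-1) :: pvIdxSome blocks 0 ++ [(blocks.length : Int)])

-- ===== PRECONDITION & SPEC =====
def Spec_find_leftmost_free_span (blocks : List (Option Int)) (file_length : Int) (out : Int) : Prop := out = find_leftmost_free_span_alt blocks file_length
instance (blocks : List (Option Int)) (file_length : Int) (out : Int) : Decidable (Spec_find_leftmost_free_span blocks file_length out) := by unfold Spec_find_leftmost_free_span; infer_instance

-- ===== CLAIM (what is proved, stated in full; the proofs are below) =====
def Claim_equal_find_leftmost_free_span : Prop := ∀ (blocks : List (Option Int)) (file_length : Int), Dom_find_leftmost_free_span blocks file_length → Spec_find_leftmost_free_span blocks file_length (find_leftmost_free_span blocks file_length)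

-- ===== LEMMAS AND PROOFS =====

-- Proof-only middle ground: a run-jumping scan; A's loop and B's gap scan are both
-- shown equal to it.
def pvRunScan (xs : List (Option Int)) (i : Int) (fl : Int) : Int :=
  match xs with
  | [] => -1
  | some _ :: rest => pvRunScan rest (i + 1) fl
  | none :: rest =>
    let len : Int := 1 + ((rest.takeWhile fun o => o.isNone).length : Int)
    if fl ≤ len then i
    else pvRunScan (rest.dropWhile fun o => o.isNone) (i + len) fl
termination_by xs.length
decreasing_by
  · simp
  · exact Nat.lt_succ_of_le (List.length_dropWhile_le _ _)

-- For non-positive file_length A's loop never triggers its match (free' ≥ 1 > fl).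
theorem pvALoop_nonpos (xs : List (Option Int)) (i fl free start : Int)
    (hfl : fl ≤ 0) (hfree : 0 ≤ free) : pvALoop xs i fl free start = -1 := by
  induction xs generalizing i free start with
  | nil => rfl
  | cons b rest ih =>
    cases b with
    | none =>
      simp only [pvALoop]
      have : ¬ (free + 1 = fl) := by omega
      simp only [this, if_false]
      exact ih _ _ _ (by omega)
    | some v => exact ih _ _ _ (by omega)

-- Mid-run lemma: with 0 < free < fl, A's loop consumes the leading None-run in one shot.
theorem pvALoop_run (xs : List (Option Int)) (i fl free start : Int)
    (hf : 0 < free) (hlt : free < fl) :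
    pvALoop xs i fl free start =
      if fl ≤ free + ((xs.takeWhile fun o => o.isNone).length : Int) then start
      else pvALoop (xs.dropWhile fun o => o.isNone)
             (i + ((xs.takeWhile fun o => o.isNone).length : Int)) fl
             (free + ((xs.takeWhile fun o => o.isNone).length : Int)) start := by
  induction xs generalizing i free with
  | nil =>
    simp only [List.takeWhile_nil, List.dropWhile_nil, List.length_nil, Int.natCast_zero,
      add_zero]
    rw [if_neg (by omega)]
  | cons b rest ih =>
    cases b with
    | none =>
      simp only [pvALoop, List.takeWhile_cons, List.dropWhile_cons, Option.isNone_none,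
        List.length_cons, if_true]
      push_cast
      simp only [if_neg (by omega : ¬ free = 0)]
      by_cases hm : free + 1 = fl
      · rw [if_pos hm, if_pos (by omega)]
      · rw [if_neg hm, ih _ _ (by omega) (by omega)]
        by_cases hc : fl ≤ free + (((rest.takeWhile fun o => o.isNone).length : Int) + 1)
        · rw [if_pos (by omega), if_pos (by omega)]
        · rw [if_neg (by omega), if_neg (by omega)]
          congr 1 <;> ring
    | some v =>
      simp only [List.takeWhile_cons, List.dropWhile_cons, Option.isNone_some,
        Bool.false_eq_true, if_false, List.length_nil, Int.natCast_zero, add_zero]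
      rw [if_neg (by omega)]

-- A's loop equals the run-jumping scan, by strong induction on the suffix length.
theorem pvALoop_eq_pvRunScan (n : ℕ) (xs : List (Option Int)) (i fl : Int)
    (hlen : xs.length ≤ n) (hfl : 0 < fl) :
    pvALoop xs i fl 0 (-1) = pvRunScan xs i fl := by
  induction n generalizing xs i with
  | zero =>
    have : xs = [] := List.length_eq_zero_iff.mp (Nat.le_zero.mp hlen)
    subst this; simp [pvALoop, pvRunScan]
  | succ n ih =>
    cases xs with
    | nil => simp [pvALoop, pvRunScan]
    | cons b rest =>
      cases b with
      | some v =>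
        have hlen' : rest.length ≤ n := by simpa using hlen
        simp only [pvALoop, pvRunScan]
        exact ih rest (i + 1) hlen'
      | none =>
        have hlen' : rest.length ≤ n := by simpa using hlen
        simp only [pvALoop, pvRunScan]
        norm_num
        by_cases h1 : (1 : Int) = fl
        · rw [if_pos h1, if_pos (by omega)]
        · rw [if_neg h1]
          rw [pvALoop_run rest (i + 1) fl 1 i (by omega) (by omega)]
          by_cases hc : fl ≤ 1 + ((rest.takeWhile fun o => o.isNone).length : Int)
          · rw [if_pos (by omega), if_pos hc]
          · rw [if_neg (by omega), if_neg hc]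
            have hdroplen : (rest.dropWhile fun o => o.isNone).length ≤ n :=
              le_trans (List.length_dropWhile_le _ _) hlen'
            cases hdw : rest.dropWhile fun o => o.isNone with
            | nil => simp [pvALoop, pvRunScan]
            | cons d r2 =>
              have hd : d.isNone = false := by
                have h := List.head?_dropWhile_not (p := fun o : Option Int => o.isNone) (l := rest)
                rw [hdw] at h
                simpa using h
              cases d with
              | none => simp at hd
              | some w =>
                simp only [pvALoop, pvRunScan]
                have hr2 : r2.length ≤ n := by
                  have := hdroplen; rw [hdw] at this; simp at this; omega
                have harith : i + 1 + ((rest.takeWhile fun o => o.isNone).length : Int) + 1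
                    = i + (1 + ((rest.takeWhile fun o => o.isNone).length : Int)) + 1 := by ring
                rw [harith]
                exact ih r2 _ hr2

-- pvIdxSome skips a leading None-run.
theorem pvIdxSome_dropRun (xs : List (Option Int)) (i : Int) :
    pvIdxSome xs i =
      pvIdxSome (xs.dropWhile fun o => o.isNone)
        (i + ((xs.takeWhile fun o => o.isNone).length : Int)) := by
  induction xs generalizing i with
  | nil => simp [pvIdxSome]
  | cons b rest ih =>
    cases b with
    | none =>
      simp only [pvIdxSome, List.takeWhile_cons, List.dropWhile_cons, Option.isNone_none,
        if_true, List.length_cons]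
      rw [ih (i + 1)]
      congr 1
      push_cast
      ring
    | some v =>
      simp [pvIdxSome]

theorem pvGapScan_cons (fl a c : Int) (rest : List Int) :
    pvGapScan fl (a :: c :: rest) = if fl ≤ c - a - 1 then a + 1 else pvGapScan fl (c :: rest) :=
  rfl

theorem pvGapScan_single (fl a : Int) : pvGapScan fl [a] = -1 := rfl

-- The run-jumping scan equals B's gap scan over the barrier list.
theorem pvRunScan_eq_gap (n : ℕ) (xs : List (Option Int)) (i fl : Int)
    (hlen : xs.length ≤ n) (hfl : 0 < fl) :
    pvRunScan xs i fl = pvGapScan fl ((i - 1) :: pvIdxSome xs i ++ [i + (xs.length : Int)]) := by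
  induction n generalizing xs i with
  | zero =>
    have : xs = [] := List.length_eq_zero_iff.mp (Nat.le_zero.mp hlen)
    subst this
    simp only [pvRunScan, pvIdxSome, List.length_nil, Int.natCast_zero, add_zero,
      List.singleton_append]
    rw [pvGapScan_cons, if_neg (by omega : ¬ fl ≤ i - (i - 1) - 1), pvGapScan_single]
  | succ n ih =>
    cases xs with
    | nil =>
      simp only [pvRunScan, pvIdxSome, List.length_nil, Int.natCast_zero, add_zero,
        List.singleton_append]
      rw [pvGapScan_cons, if_neg (by omega : ¬ fl ≤ i - (i - 1) - 1), pvGapScan_single]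
    | cons b rest =>
      cases b with
      | some v =>
        have hlen' : rest.length ≤ n := by simpa using hlen
        simp only [pvRunScan, pvIdxSome, List.cons_append, List.length_cons]
        rw [pvGapScan_cons, if_neg (by omega : ¬ fl ≤ i - (i - 1) - 1)]
        rw [ih rest (i + 1) hlen']
        have e1 : i + 1 - 1 = i := by ring
        have e2 : i + 1 + ((rest.length : ℕ) : Int) = i + (((rest.length + 1 : ℕ)) : Int) := by
          push_cast; ring
        rw [e1, e2, List.cons_append]
      | none =>
        have hlen' : rest.length ≤ n := by simpa using hlen
        simp only [pvRunScan, pvIdxSome, List.length_cons]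
        rw [pvIdxSome_dropRun rest (i + 1)]
        set k : Int := ((rest.takeWhile fun o => o.isNone).length : Int) with hk
        have hk0 : 0 ≤ k := by positivity
        have hsplit : (rest.length : Int)
            = k + ((rest.dropWhile fun o => o.isNone).length : Int) := by
          have h := congrArg List.length
            (List.takeWhile_append_dropWhile (p := fun o : Option Int => o.isNone) (l := rest))
          simp only [List.length_append] at h
          rw [hk, ← h]
          push_cast
          ring
        cases hdw : rest.dropWhile fun o => o.isNone with
        | nil =>
          rw [hdw] at hsplit
          simp only [List.length_nil, Int.natCast_zero, add_zero] at hsplit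
          simp only [pvIdxSome, List.singleton_append]
          rw [pvGapScan_cons]
          have hg : i + (((rest.length + 1 : ℕ)) : Int) - (i - 1) - 1 = 1 + k := by
            push_cast
            omega
          rw [hg]
          by_cases hc : fl ≤ 1 + k
          · rw [if_pos hc, if_pos hc]; ring
          · rw [if_neg hc, if_neg hc]
            simp [pvRunScan, pvGapScan_single]
        | cons d r2 =>
          have hd : d.isNone = false := by
            have h := List.head?_dropWhile_not (p := fun o : Option Int => o.isNone) (l := rest)
            rw [hdw] at h
            simpa using h
          cases d with
          | none => simp at hd
          | some w =>
            rw [hdw] at hsplit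
            simp only [List.length_cons] at hsplit
            simp only [pvIdxSome, List.cons_append]
            rw [pvGapScan_cons]
            have hg : i + 1 + k - (i - 1) - 1 = 1 + k := by ring
            rw [hg]
            by_cases hc : fl ≤ 1 + k
            · rw [if_pos hc, if_pos hc]; ring
            · rw [if_neg hc, if_neg hc]
              have hr2 : ((some w : Option Int) :: r2).length ≤ n := by
                have := le_trans (List.length_dropWhile_le (p := fun o : Option Int => o.isNone)
                  (l := rest)) hlen'
                rw [hdw] at this; simpa using this
              rw [ih ((some w) :: r2) (i + (1 + k)) hr2]
              simp only [pvIdxSome, List.cons_append, List.length_cons]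
              rw [pvGapScan_cons, if_neg (by omega : ¬ fl ≤ i + (1 + k) - (i + (1 + k) - 1) - 1)]
              have e1 : i + (1 + k) = i + 1 + k := by ring
              rw [e1]
              have e3 : i + 1 + k + (((r2.length + 1 : ℕ)) : Int)
                  = i + (((rest.length + 1 : ℕ)) : Int) := by
                push_cast
                push_cast at hsplit
                omega
              rw [e3]

-- ===== VERDICT (by name: the statement is the Claim_ definition above) =====
theorem find_leftmost_free_span_spec : Claim_equal_find_leftmost_free_span := by
  intro blocks fl _
  unfold Spec_find_leftmost_free_span find_leftmost_free_span find_leftmost_free_span_alt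
  by_cases h : fl ≤ 0
  · rw [if_pos h]
    exact pvALoop_nonpos blocks 0 fl 0 (-1) h le_rfl
  · rw [if_neg h]
    rw [pvALoop_eq_pvRunScan blocks.length blocks 0 fl le_rfl (by omega)]
    rw [pvRunScan_eq_gap blocks.length blocks 0 fl le_rfl (by omega)]
    norm_num
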